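-- pv_equiv track=rewrite | github.com/VITOHJL/abot | abot/agent/loop.py | _split_into_turns
-- ===== SOURCE A (Python) =====
-- from typing import TYPE_CHECKING, Any, Awaitable, Callable
--
-- def _split_into_turns(messages: list[dict[str, Any]]) -> list[tuple[int, int, list[dict[str, Any]]]]:
--     """
--     Split messages into turns. A turn = from role=user to (exclusive of) next role=user.
--
--     Returns list of (start_idx, end_idx, turn_messages) in original message indices.
--     """
--     turns: list[tuple[int, int, list[dict[str, Any]]]] = []
--     i = 0
--     while i < len(messages):
--         if messages[i].get("role") != "user":
--             i += 1
--             continue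
--         start = i
--         i += 1
--         while i < len(messages) and messages[i].get("role") != "user":
--             i += 1
--         end = i
--         turns.append((start, end, messages[start:end]))
--     return turns
-- ===== SOURCE B (Python) =====
-- def _split_into_turns(messages: list) -> list:
--     """
--     Split messages into turns. A turn = from role=user to (exclusive of) next role=user.
--
--     Two-phase: first collect the boundary indices (positions with role == "user"),
--     then pair each boundary with the next one (or len(messages)) and slice.
--     """
--     boundaries = [i for i in range(len(messages)) if messages[i].get("role") == "user"]
--     ends = boundaries[1:] + [len(messages)]
--     return [(s, e, messages[s:e]) for s, e in zip(boundaries, ends)]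
-- ===== Notes on version B (the rewrite author's own statement) =====
-- stated objective: idiomatic
-- what changed: Replaces A's nested while-scan over a running index with a two-phase approach: first compute the list of all boundary indices where role=='user', then zip each boundary with its successor (or len(messages)) and slice.
import Mathlib
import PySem

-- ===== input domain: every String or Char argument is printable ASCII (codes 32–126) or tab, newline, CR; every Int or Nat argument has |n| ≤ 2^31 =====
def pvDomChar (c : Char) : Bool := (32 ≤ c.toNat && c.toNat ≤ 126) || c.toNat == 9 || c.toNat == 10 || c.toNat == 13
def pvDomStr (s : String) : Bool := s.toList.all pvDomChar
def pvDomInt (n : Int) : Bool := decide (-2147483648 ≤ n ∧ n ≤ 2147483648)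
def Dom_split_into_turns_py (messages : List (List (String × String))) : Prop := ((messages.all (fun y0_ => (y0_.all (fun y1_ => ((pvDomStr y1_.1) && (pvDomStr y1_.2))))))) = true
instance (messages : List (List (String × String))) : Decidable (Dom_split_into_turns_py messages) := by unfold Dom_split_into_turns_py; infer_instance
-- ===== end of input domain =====

-- B replaces A's nested while-scan with a two-phase boundary-index-then-pair-up approach (idiomatic, same O(n)).

-- ===== PORT A =====
-- m.get("role") == "user"  (shared one-line primitive wrapper)
def pvRoleIsUser (m : List (String × String)) : Bool :=
  (PySem.Dict.mk m).get? "role" == some "user"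

-- A's inner while: first index j ≥ i with role == "user", else len(messages)
def pvScanEnd (messages : List (List (String × String))) (i : Nat) : Nat :=
  if h : i < messages.length then
    if pvRoleIsUser messages[i]! then i else pvScanEnd messages (i + 1)
  else i
termination_by messages.length - i

-- needed by pvLoopA's termination
theorem pvScanEnd_ge (ms : List (List (String × String))) (j : Nat) : j ≤ pvScanEnd ms j := by
  unfold pvScanEnd
  split_ifs with h1 h2
  · exact le_refl _
  · have := pvScanEnd_ge ms (j + 1); omega
  · exact le_refl _
termination_by ms.length - j

-- A's outer while over the running index i
def pvLoopA (ms : List (List (String × String))) (i : Nat) :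
    List (Int × Int × (List (List (String × String)))) :=
  if h : i < ms.length then
    if !(pvRoleIsUser ms[i]!) then pvLoopA ms (i + 1)
    else
      ((i : Int), ((pvScanEnd ms (i + 1) : Nat) : Int),
        PySem.List.slice ms (some (i : Int)) (some ((pvScanEnd ms (i + 1) : Nat) : Int)))
        :: pvLoopA ms (pvScanEnd ms (i + 1))
  else []
termination_by ms.length - i
decreasing_by
  · omega
  · have := pvScanEnd_ge ms (i + 1); omega

def split_into_turns_py (messages : List (List (String × String))) : List (Int × Int × (List (List (String × String)))) :=
  pvLoopA messages 0

-- ===== PORT B =====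
def split_into_turns_py_alt (messages : List (List (String × String))) : List (Int × Int × (List (List (String × String)))) :=
  let boundaries := (List.range messages.length).filter (fun i => pvRoleIsUser messages[i]!)
  let ends := PySem.List.slice boundaries (some 1) none ++ [messages.length]
  (boundaries.zip ends).map
    (fun p => ((p.1 : Int), (p.2 : Int), PySem.List.slice messages (some (p.1 : Int)) (some (p.2 : Int))))

-- ===== PRECONDITION & SPEC =====
def Spec_split_into_turns_py (messages : List (List (String × String))) (out : List (Int × Int × (List (List (String × String))))) : Prop := out = split_into_turns_py_alt messages
instance (messages : List (List (String × String))) (out : List (Int × Int × (List (List (String × String))))) : Decidable (Spec_split_into_turns_py messages out) := by unfold Spec_split_into_turns_py; infer_instance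

-- ===== CLAIM (what is proved, stated in full; the proofs are below) =====
def Claim_equal_split_into_turns_py : Prop := ∀ (messages : List (List (String × String))), Dom_split_into_turns_py messages → Spec_split_into_turns_py messages (split_into_turns_py messages)

-- ===== LEMMAS AND PROOFS =====

-- canonical pairing: each boundary with the next boundary (or len)
def pvPairUp (ms : List (List (String × String))) : List Nat → List (Int × Int × (List (List (String × String))))
  | [] => []
  | b :: rest =>
      ((b : Int), ((rest.headD ms.length : Nat) : Int),
        PySem.List.slice ms (some (b : Int)) (some ((rest.headD ms.length : Nat) : Int))) :: pvPairUp ms rest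

-- boundary indices ≥ i
def pvBFrom (ms : List (List (String × String))) (i : Nat) : List Nat :=
  if h : i < ms.length then
    if pvRoleIsUser ms[i]! then i :: pvBFrom ms (i + 1) else pvBFrom ms (i + 1)
  else []
termination_by ms.length - i

-- branch equations, stated once so the main proofs can rewrite with them
theorem pvScanEnd_stop (ms : List (List (String × String))) (j : Nat)
    (h1 : j < ms.length) (h2 : pvRoleIsUser ms[j]! = true) : pvScanEnd ms j = j := by
  rw [pvScanEnd, dif_pos h1, if_pos h2]

theorem pvScanEnd_step (ms : List (List (String × String))) (j : Nat)
    (h1 : j < ms.length) (h2 : pvRoleIsUser ms[j]! = false) : pvScanEnd ms j = pvScanEnd ms (j + 1) := by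
  rw [pvScanEnd, dif_pos h1, if_neg (by rw [h2]; simp)]

theorem pvScanEnd_out (ms : List (List (String × String))) (j : Nat)
    (h1 : ¬ j < ms.length) : pvScanEnd ms j = j := by
  rw [pvScanEnd]; simp [h1]

theorem pvBFrom_cons (ms : List (List (String × String))) (j : Nat)
    (h1 : j < ms.length) (h2 : pvRoleIsUser ms[j]! = true) : pvBFrom ms j = j :: pvBFrom ms (j + 1) := by
  rw [pvBFrom, dif_pos h1, if_pos h2]

theorem pvBFrom_step (ms : List (List (String × String))) (j : Nat)
    (h1 : j < ms.length) (h2 : pvRoleIsUser ms[j]! = false) : pvBFrom ms j = pvBFrom ms (j + 1) := by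
  rw [pvBFrom, dif_pos h1, if_neg (by rw [h2]; simp)]

theorem pvBFrom_out (ms : List (List (String × String))) (j : Nat)
    (h1 : ¬ j < ms.length) : pvBFrom ms j = [] := by
  rw [pvBFrom]; simp [h1]

theorem pvZip_pairUp (ms : List (List (String × String))) (bs : List Nat) :
    (bs.zip (bs.tail ++ [ms.length])).map
      (fun p => ((p.1 : Int), (p.2 : Int), PySem.List.slice ms (some (p.1 : Int)) (some (p.2 : Int))))
      = pvPairUp ms bs := by
  induction bs with
  | nil => simp [pvPairUp]
  | cons b rest ih =>
    cases rest with
    | nil => simp [pvPairUp]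
    | cons b' rs =>
      simp only [List.tail_cons] at ih ⊢
      simp only [List.cons_append, List.zip_cons_cons, List.map_cons, ih, pvPairUp, List.headD_cons]

theorem pvBFrom_eq_filter (ms : List (List (String × String))) (i : Nat) :
    pvBFrom ms i = (List.range' i (ms.length - i)).filter (fun j => pvRoleIsUser ms[j]!) := by
  by_cases h1 : i < ms.length
  · have hk : ms.length - i = (ms.length - (i + 1)) + 1 := by omega
    rw [hk, List.range'_succ]
    simp only [List.filter_cons]
    by_cases h2 : pvRoleIsUser ms[i]! = true
    · rw [pvBFrom_cons ms i h1 h2, pvBFrom_eq_filter ms (i + 1), if_pos h2]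
    · rw [pvBFrom_step ms i h1 (by simpa using h2), pvBFrom_eq_filter ms (i + 1),
        if_neg (by simpa using h2)]
  · have hk : ms.length - i = 0 := by omega
    rw [hk, pvBFrom_out ms i h1]; rfl
termination_by ms.length - i

theorem pvScanEnd_le (ms : List (List (String × String))) (j : Nat) (hj : j ≤ ms.length) :
    pvScanEnd ms j ≤ ms.length := by
  by_cases h1 : j < ms.length
  · by_cases h2 : pvRoleIsUser ms[j]! = true
    · rw [pvScanEnd_stop ms j h1 h2]; omega
    · rw [pvScanEnd_step ms j h1 (by simpa using h2)]
      exact pvScanEnd_le ms (j + 1) h1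
  · rw [pvScanEnd_out ms j h1]; omega
termination_by ms.length - j

theorem pvScanEnd_user (ms : List (List (String × String))) (j : Nat)
    (h : pvScanEnd ms j < ms.length) : pvRoleIsUser ms[pvScanEnd ms j]! = true := by
  by_cases h1 : j < ms.length
  · by_cases h2 : pvRoleIsUser ms[j]! = true
    · rw [pvScanEnd_stop ms j h1 h2]; exact h2
    · rw [pvScanEnd_step ms j h1 (by simpa using h2)] at h ⊢
      exact pvScanEnd_user ms (j + 1) h
  · rw [pvScanEnd_out ms j h1] at h; omega
termination_by ms.length - j

theorem pvBFrom_scanEnd (ms : List (List (String × String))) (j : Nat) :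
    pvBFrom ms j = pvBFrom ms (pvScanEnd ms j) := by
  by_cases h1 : j < ms.length
  · by_cases h2 : pvRoleIsUser ms[j]! = true
    · rw [pvScanEnd_stop ms j h1 h2]
    · rw [pvScanEnd_step ms j h1 (by simpa using h2), pvBFrom_step ms j h1 (by simpa using h2)]
      exact pvBFrom_scanEnd ms (j + 1)
  · rw [pvScanEnd_out ms j h1]
termination_by ms.length - j

theorem pvBFrom_head (ms : List (List (String × String))) (j : Nat) :
    pvBFrom ms j =
      if pvScanEnd ms j < ms.length then pvScanEnd ms j :: pvBFrom ms (pvScanEnd ms j + 1) else [] := by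
  rw [pvBFrom_scanEnd]
  split_ifs with h
  · exact pvBFrom_cons ms _ h (pvScanEnd_user ms j h)
  · exact pvBFrom_out ms _ h

theorem pvLoopA_user (ms : List (List (String × String))) (i : Nat)
    (h1 : i < ms.length) (h2 : pvRoleIsUser ms[i]! = true) :
    pvLoopA ms i = ((i : Int), ((pvScanEnd ms (i + 1) : Nat) : Int),
        PySem.List.slice ms (some (i : Int)) (some ((pvScanEnd ms (i + 1) : Nat) : Int)))
        :: pvLoopA ms (pvScanEnd ms (i + 1)) := by
  rw [pvLoopA, dif_pos h1, if_neg (by rw [h2]; simp)]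

theorem pvLoopA_skip (ms : List (List (String × String))) (i : Nat)
    (h1 : i < ms.length) (h2 : pvRoleIsUser ms[i]! = false) : pvLoopA ms i = pvLoopA ms (i + 1) := by
  rw [pvLoopA, dif_pos h1, if_pos (by rw [h2]; rfl)]

theorem pvLoopA_out (ms : List (List (String × String))) (i : Nat)
    (h1 : ¬ i < ms.length) : pvLoopA ms i = [] := by
  rw [pvLoopA]; simp [h1]

theorem pvLoopA_eq (ms : List (List (String × String))) (i : Nat) :
    pvLoopA ms i = pvPairUp ms (pvBFrom ms i) := by
  by_cases h1 : i < ms.length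
  · by_cases h2 : pvRoleIsUser ms[i]! = true
    · rw [pvLoopA_user ms i h1 h2, pvBFrom_cons ms i h1 h2, pvPairUp]
      have he := pvScanEnd_ge ms (i + 1)
      have hle := pvScanEnd_le ms (i + 1) (by omega)
      have hhead : (pvBFrom ms (i + 1)).headD ms.length = pvScanEnd ms (i + 1) := by
        rw [pvBFrom_head ms (i + 1)]
        split_ifs with hc
        · simp
        · simp; omega
      rw [hhead, pvBFrom_scanEnd ms (i + 1), pvLoopA_eq ms (pvScanEnd ms (i + 1))]
    · rw [pvLoopA_skip ms i h1 (by simpa using h2), pvBFrom_step ms i h1 (by simpa using h2)]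
      exact pvLoopA_eq ms (i + 1)
  · rw [pvLoopA_out ms i h1, pvBFrom_out ms i h1]; rfl
termination_by ms.length - i
decreasing_by
  · have := pvScanEnd_ge ms (i + 1); omega
  · omega

-- ===== VERDICT (by name: the statement is the Claim_ definition above) =====
theorem split_into_turns_py_spec : Claim_equal_split_into_turns_py := by
  intro messages _
  unfold Spec_split_into_turns_py split_into_turns_py
  have h0 : split_into_turns_py_alt messages =
      (((List.range messages.length).filter (fun i => pvRoleIsUser messages[i]!)).zip
        (PySem.List.slice ((List.range messages.length).filter (fun i => pvRoleIsUser messages[i]!)) (some 1) none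
          ++ [messages.length])).map
        (fun p => ((p.1 : Int), (p.2 : Int), PySem.List.slice messages (some (p.1 : Int)) (some (p.2 : Int)))) := rfl
  rw [PySem.List.slice_from_one] at h0
  rw [h0, pvZip_pairUp, pvLoopA_eq messages 0]
  congr 1
  rw [pvBFrom_eq_filter messages 0]
  simp [List.range_eq_range']
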